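-- pv_equiv track=rewrite | github.com/lordkli/leetcode | matris_soru_1.py | solution
-- ===== SOURCE A (Python) =====
-- def solution(sayi:int)-> list[list[int]]:
--     deger = 10
--     temp = deger
--     azalis = 2
--     matris = [[0 for x in range(4)] for y in range(sayi)]
--     for i in range(sayi):
--         for j in range(4):
--             matris[i][j] = temp
--             temp -= azalis
--         deger += 10
--         temp = deger
--         azalis += 1
--     return matris
-- ===== SOURCE B (Python) =====
-- def solution(sayi: int) -> list[list[int]]:
--     # closed form: row i starts at 10*(i+1) and decreases by (i+2) per column
--     return [[10 * (i + 1) - j * (i + 2) for j in range(4)] for i in range(sayi)]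
-- ===== Notes on version B (the rewrite author's own statement) =====
-- stated objective: simpler
-- what changed: Replaced the stateful nested loop (running temp/deger/azalis accumulators mutated into a pre-built zero matrix) by a nested comprehension computing each cell independently from a closed-form formula in the row and column indices.
import Mathlib
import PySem

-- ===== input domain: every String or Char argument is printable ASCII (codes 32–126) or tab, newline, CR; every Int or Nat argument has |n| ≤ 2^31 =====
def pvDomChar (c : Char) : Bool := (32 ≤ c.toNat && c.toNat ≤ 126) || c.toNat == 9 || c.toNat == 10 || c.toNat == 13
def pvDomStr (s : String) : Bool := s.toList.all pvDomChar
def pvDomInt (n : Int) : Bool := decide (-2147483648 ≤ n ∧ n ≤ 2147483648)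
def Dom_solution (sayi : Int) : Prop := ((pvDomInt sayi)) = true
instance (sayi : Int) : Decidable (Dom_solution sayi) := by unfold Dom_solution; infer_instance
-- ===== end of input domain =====

-- B replaces A's mutated accumulators with an independent closed-form cell formula (objective: simpler).

-- ===== PORT A =====
-- matris[i][j] = temp ; temp -= azalis   (indices i,j are in range and nonnegative here, so .toNat/set is exact)
def aInner (i azalis : Int) (p : List (List Int) × Int) (j : Int) : List (List Int) × Int :=
  ((p.1).set i.toNat (((p.1).getD i.toNat []).set j.toNat p.2), p.2 - azalis)

-- one iteration of the outer loop; state (matris, deger, temp, azalis)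
def aStep (s : List (List Int) × Int × Int × Int) (i : Int) : List (List Int) × Int × Int × Int :=
  let r := (PySem.List.pyRange 0 4 1).foldl (aInner i s.2.2.2) (s.1, s.2.2.1)
  (r.1, s.2.1 + 10, s.2.1 + 10, s.2.2.2 + 1)

def solution (sayi : Int) : List (List Int) :=
  let matris := (PySem.List.pyRange 0 sayi 1).map (fun _ => (PySem.List.pyRange 0 4 1).map (fun _ => (0 : Int)))
  ((PySem.List.pyRange 0 sayi 1).foldl aStep (matris, 10, 10, 2)).1

-- ===== PORT B =====
def solution_alt (sayi : Int) : List (List Int) :=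
  (PySem.List.pyRange 0 sayi 1).map (fun i =>
    (PySem.List.pyRange 0 4 1).map (fun j => 10 * (i + 1) - j * (i + 2)))

-- ===== PRECONDITION & SPEC =====
def Spec_solution (sayi : Int) (out : List (List Int)) : Prop := out = solution_alt sayi
instance (sayi : Int) (out : List (List Int)) : Decidable (Spec_solution sayi out) := by unfold Spec_solution; infer_instance

-- ===== CLAIM (what is proved, stated in full; the proofs are below) =====
def Claim_equal_solution : Prop := ∀ (sayi : Int), Dom_solution sayi → Spec_solution sayi (solution sayi)

-- ===== LEMMAS AND PROOFS =====

def rowF (t a : Int) : List Int := [t, t - a, t - a - a, t - a - a - a]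

def rowAt (deger azalis : Int) (k : ℕ) : List Int :=
  rowF (deger + 10 * (k : Int)) (azalis + (k : Int))

lemma set_append_length {α : Type} (xs : List α) (v y : α) (ys : List α) :
    (xs ++ y :: ys).set xs.length v = xs ++ v :: ys := by
  induction xs with
  | nil => rfl
  | cons x xs ih => simp [ih]

lemma getD_set_self (m : List (List Int)) (i : ℕ) (v : List Int) (hi : i < m.length) :
    (m.set i v).getD i [] = v := by
  simp [List.getD, List.getElem?_set_self hi]

lemma inner_eval (i : ℕ) (m : List (List Int)) (t a : Int)
    (hi : i < m.length) (hr : (m.getD i []).length = 4) :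
    (PySem.List.pyRange 0 4 1).foldl (aInner (↑i) a) (m, t) =
      (m.set i (rowF t a), t - a - a - a - a) := by
  have hrange : PySem.List.pyRange 0 4 1 = [0, 1, 2, 3] := by decide
  have hg : m.getD i [] = m[i] := by simp [List.getD, List.getElem?_eq_getElem hi]
  rw [hrange]
  simp only [List.foldl, aInner, Int.toNat_natCast, getD_set_self _ _ _ hi, List.set_set]
  norm_num
  rw [show ((2 : Int).toNat) = 2 from rfl, show ((3 : Int).toNat) = 3 from rfl]
  have hg2 : m[i]?.getD [] = m[i] := by simp [List.getElem?_eq_getElem hi]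
  rcases hm : m[i] with _ | ⟨r0, _ | ⟨r1, _ | ⟨r2, _ | ⟨r3, rt⟩⟩⟩⟩ <;>
    rw [hg2, hm] <;> simp_all [rowF]

lemma outer_eval (n : ℕ) : ∀ (m : List (List Int)) (deger azalis : Int),
    n ≤ m.length → (∀ r ∈ m, r.length = 4) →
    (PySem.List.pyRange 0 (↑n) 1).foldl aStep (m, deger, deger, azalis) =
      ((List.range n).map (rowAt deger azalis) ++ m.drop n,
        deger + 10 * n, deger + 10 * n, azalis + n) := by
  induction n with
  | zero => intro m deger azalis _ _; simp [PySem.List.pyRange_one_eq_nil]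
  | succ n ih =>
    intro m deger azalis hn hrows
    have hn' : n < m.length := by omega
    have hsplit : PySem.List.pyRange 0 (↑(n + 1)) 1 =
        PySem.List.pyRange 0 (↑n) 1 ++ [(↑n : Int)] := by
      push_cast
      exact PySem.List.pyRange_one_succ_right (by positivity)
    rw [hsplit, List.foldl_append, ih m deger azalis (by omega) hrows]
    simp only [List.foldl]
    set M : List (List Int) :=
      (List.range n).map (rowAt deger azalis) ++ m.drop n with hM
    have hlenpre : ((List.range n).map (rowAt deger azalis)).length = n := by simp
    have hdrop : m.drop n = m[n] :: m.drop (n + 1) := List.drop_eq_getElem_cons hn'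
    have hMlen : n < M.length := by
      rw [hM]; simp; omega
    have hMget : M.getD n [] = m[n] := by
      rw [hM, hdrop, List.getD, List.getElem?_append_right (by omega)]
      simp [hlenpre, List.getElem?_eq_getElem hn']
    have hMr : (M.getD n []).length = 4 := by
      rw [hMget]; exact hrows _ (List.getElem_mem hn')
    unfold aStep
    rw [inner_eval n M _ _ hMlen hMr]
    have hset : M.set n (rowF (deger + 10 * ↑n) (azalis + ↑n)) =
        (List.range (n + 1)).map (rowAt deger azalis) ++ m.drop (n + 1) := by
      rw [hM, hdrop, List.range_succ, List.map_append]
      have := set_append_length ((List.range n).map (rowAt deger azalis))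
        (rowF (deger + 10 * ↑n) (azalis + ↑n)) (m[n]) (m.drop (n + 1))
      rw [hlenpre] at this
      rw [this]
      simp [rowAt]
    rw [hset]
    push_cast
    ring_nf

-- ===== VERDICT (by name: the statement is the Claim_ definition above) =====
theorem solution_spec : Claim_equal_solution := by
  intro sayi _
  unfold Spec_solution solution solution_alt
  rcases (by omega : sayi ≤ 0 ∨ 0 < sayi) with h | h
  · rw [PySem.List.pyRange_one_eq_nil h]; simp
  · have hn : sayi = (sayi.toNat : Int) := (Int.toNat_of_nonneg h.le).symm
    set n := sayi.toNat with hndef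
    rw [hn]
    have hinit : (PySem.List.pyRange 0 (↑n) 1).map
        (fun _ => (PySem.List.pyRange 0 4 1).map (fun _ => (0 : Int))) =
        (List.range n).map (fun _ => [0, 0, 0, 0]) := by
      have h4 : (PySem.List.pyRange 0 4 1).map (fun _ => (0 : Int)) = [0, 0, 0, 0] := by decide
      rw [h4, PySem.List.pyRange_one]
      simp [List.map_map, Function.comp_def]
    rw [hinit]
    show ((List.foldl aStep ((List.range n).map (fun _ => [0, 0, 0, 0]), 10, 10, 2)
        (PySem.List.pyRange 0 (↑n) 1)).1) = _
    rw [outer_eval n _ 10 2 (by simp) (by intro r hr; simp at hr; simp [hr])]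
    have h44 : PySem.List.pyRange 0 4 1 = ([0, 1, 2, 3] : List Int) := by decide
    rw [h44, PySem.List.pyRange_one]
    have hdd : ((List.range n).map (fun _ => ([0, 0, 0, 0] : List Int))).drop n = [] := by simp
    rw [hdd, List.append_nil]
    simp only [List.map_map]
    apply List.map_congr_left
    intro k hk
    show rowAt 10 2 k =
      ([0, 1, 2, 3] : List Int).map (fun j => 10 * ((0 + (k : Int)) + 1) - j * ((0 + k) + 2))
    simp [rowAt, rowF]
    refine ⟨by ring, by ring, by ring, by ring⟩
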